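-- pv_equiv track=rewrite | github.com/Beneficial-AI-Foundation/vericoding | spec_to_code.py | fix_incomplete_lean_code
-- ===== SOURCE A (Python) =====
-- def fix_incomplete_lean_code(code):
--     """Fix incomplete Lean code patterns."""
--     lines = code.split("\n")
--     fixed_lines = []
--
--     for i, line in enumerate(lines):
--         # Fix incomplete sorry statements
--         if "sorry" not in line and (
--             line.strip().startswith("theorem ")
--             or line.strip().startswith("lemma ")
--             or line.strip().startswith("def ")
--         ):
--             # Look ahead to see if there's a body
--             has_body = False
--             for j in range(i + 1, len(lines)):
--                 if ":=" in lines[j] or "sorry" in lines[j] or "where" in lines[j]: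
--                     has_body = True
--                     break
--                 if (
--                     lines[j].strip().startswith("theorem ")
--                     or lines[j].strip().startswith("lemma ")
--                     or lines[j].strip().startswith("def ")
--                 ):
--                     break
--             if not has_body and ":" in line:
--                 # Add sorry for incomplete theorems/lemmas
--                 fixed_lines.append(line)
--                 fixed_lines.append("  sorry")
--                 continue
--
--         fixed_lines.append(line)
--
--     return "\n".join(fixed_lines)
-- ===== SOURCE B (Python) =====
-- def fix_incomplete_lean_code(code):
--     """Fix incomplete Lean code patterns."""
--     lines = code.split("\n")
--     out_rev = []
--     body_ahead = False  # whether the nearest marker-or-declaration line below is a body marker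
--     for line in reversed(lines):
--         stripped = line.strip()
--         is_decl = (
--             stripped.startswith("theorem ")
--             or stripped.startswith("lemma ")
--             or stripped.startswith("def ")
--         )
--         if "sorry" not in line and is_decl and not body_ahead and ":" in line:
--             out_rev.append("  sorry")
--         out_rev.append(line)
--         if ":=" in line or "sorry" in line or "where" in line:
--             body_ahead = True
--         elif is_decl:
--             body_ahead = False
--     return "\n".join(reversed(out_rev))
-- ===== Notes on version B (the rewrite author's own statement) =====
-- stated objective: alternative
-- what changed: Replaced the per-declaration forward lookahead scan (worst-case quadratic) with a single backward pass maintaining one boolean flag recording whether the nearest body-marker-or-declaration line below is a body marker.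
import Mathlib
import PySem

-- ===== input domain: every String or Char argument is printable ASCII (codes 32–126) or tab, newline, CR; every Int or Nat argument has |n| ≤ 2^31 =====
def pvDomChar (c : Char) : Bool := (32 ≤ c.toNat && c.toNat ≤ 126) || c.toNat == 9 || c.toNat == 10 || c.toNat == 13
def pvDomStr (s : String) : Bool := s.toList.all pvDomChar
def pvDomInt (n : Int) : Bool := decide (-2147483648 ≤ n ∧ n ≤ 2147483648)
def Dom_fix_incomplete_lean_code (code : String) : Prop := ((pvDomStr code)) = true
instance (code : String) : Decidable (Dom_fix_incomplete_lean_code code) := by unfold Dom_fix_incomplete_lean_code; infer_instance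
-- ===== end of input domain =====

-- B replaces A's per-declaration forward lookahead scan with a single backward pass that keeps
-- one body-ahead boolean, so the inner scan disappears (objective: alternative single-pass algorithm).


-- ===== PORT A =====
-- inner loop 'for j in range(i+1, len(lines)): … lines[j] …' with break: the values visited are
-- exactly the suffix of lines after the current one, scanned in order (break = returning a result).
def aHasBody : List String → Bool
  | [] => false
  | lj :: rest =>
    if PySem.Str.isIn ":=" lj || PySem.Str.isIn "sorry" lj || PySem.Str.isIn "where" lj then
      true
    else if PySem.Str.startswith (PySem.Str.strip lj) "theorem "
         || PySem.Str.startswith (PySem.Str.strip lj) "lemma "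
         || PySem.Str.startswith (PySem.Str.strip lj) "def " then
      false
    else aHasBody rest

-- outer 'for i, line in enumerate(lines)' with accumulator fixed_lines (built by cons, reversed at the end)
def aLoop : List String → List String → List String
  | [], acc => acc.reverse
  | line :: tl, acc =>
    if !PySem.Str.isIn "sorry" line
       && (PySem.Str.startswith (PySem.Str.strip line) "theorem "
           || PySem.Str.startswith (PySem.Str.strip line) "lemma "
           || PySem.Str.startswith (PySem.Str.strip line) "def ") then
      if !aHasBody tl && PySem.Str.isIn ":" line then
        aLoop tl ("  sorry" :: line :: acc)
      else
        aLoop tl (line :: acc)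
    else
      aLoop tl (line :: acc)

def fix_incomplete_lean_code (code : String) : String :=
  -- code.split("\n"): the separator "\n" is nonempty, so split? is always `some`
  let lines := (PySem.Str.split? code "\n").getD []
  PySem.Str.join "\n" (aLoop lines [])

-- ===== PORT B =====
-- one step of Source B's backward loop: state = (body_ahead, output list)
def altStep (st : Bool × List String) (line : String) : Bool × List String :=
  let stripped := PySem.Str.strip line
  let isDecl := PySem.Str.startswith stripped "theorem "
             || PySem.Str.startswith stripped "lemma "
             || PySem.Str.startswith stripped "def "
  let out :=
    if !PySem.Str.isIn "sorry" line && isDecl && !st.1 && PySem.Str.isIn ":" line then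
      line :: "  sorry" :: st.2
    else
      line :: st.2
  let flag :=
    if PySem.Str.isIn ":=" line || PySem.Str.isIn "sorry" line || PySem.Str.isIn "where" line then
      true
    else if isDecl then
      false
    else st.1
  (flag, out)

def fix_incomplete_lean_code_alt (code : String) : String :=
  let lines := (PySem.Str.split? code "\n").getD []
  -- 'for line in reversed(lines)' appending to out_rev; building by cons here yields
  -- reversed(out_rev) directly, which is exactly what Source B joins at the end
  let st := lines.reverse.foldl altStep (false, [])
  PySem.Str.join "\n" st.2

-- ===== PRECONDITION & SPEC =====
def Spec_fix_incomplete_lean_code (code : String) (out : String) : Prop := out = fix_incomplete_lean_code_alt code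
instance (code : String) (out : String) : Decidable (Spec_fix_incomplete_lean_code code out) := by unfold Spec_fix_incomplete_lean_code; infer_instance

-- ===== CLAIM (what is proved, stated in full; the proofs are below) =====
def Claim_equal_fix_incomplete_lean_code : Prop := ∀ (code : String), Dom_fix_incomplete_lean_code code → Spec_fix_incomplete_lean_code code (fix_incomplete_lean_code code)

-- ===== LEMMAS AND PROOFS =====

-- the common per-line result both loops produce
def fixList : List String → List String
  | [] => []
  | line :: tl =>
    if !PySem.Str.isIn "sorry" line
       && (PySem.Str.startswith (PySem.Str.strip line) "theorem "
           || PySem.Str.startswith (PySem.Str.strip line) "lemma "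
           || PySem.Str.startswith (PySem.Str.strip line) "def ") then
      if !aHasBody tl && PySem.Str.isIn ":" line then
        line :: "  sorry" :: fixList tl
      else
        line :: fixList tl
    else
      line :: fixList tl

theorem aLoop_eq_fixList : ∀ (rest acc : List String), aLoop rest acc = acc.reverse ++ fixList rest := by
  intro rest
  induction rest with
  | nil => intro acc; simp [aLoop, fixList]
  | cons line tl ih =>
    intro acc
    cases h1 : (!PySem.Str.isIn "sorry" line
       && (PySem.Str.startswith (PySem.Str.strip line) "theorem "
           || PySem.Str.startswith (PySem.Str.strip line) "lemma "
           || PySem.Str.startswith (PySem.Str.strip line) "def "))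
    · simp only [aLoop, fixList, h1, Bool.false_eq_true, if_false, ih]
      simp
    · cases h2 : (!aHasBody tl && PySem.Str.isIn ":" line) <;>
        · simp only [aLoop, fixList, h1, h2, Bool.false_eq_true, if_true, if_false, ih]
          simp

-- B's fold computes A's lookahead flag and the fixed lines in one pass
theorem fold_eq_fixList : ∀ (lines : List String),
    List.foldr (fun x y => altStep y x) (false, []) lines = (aHasBody lines, fixList lines) := by
  intro lines
  induction lines with
  | nil => rfl
  | cons line tl ih =>
    rw [List.foldr_cons, ih]
    cases hm : (PySem.Str.isIn ":=" line || PySem.Str.isIn "sorry" line || PySem.Str.isIn "where" line) <;>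
    cases hd : (PySem.Str.startswith (PySem.Str.strip line) "theorem "
           || PySem.Str.startswith (PySem.Str.strip line) "lemma "
           || PySem.Str.startswith (PySem.Str.strip line) "def ") <;>
    cases hs : PySem.Str.isIn "sorry" line <;>
    cases hb : aHasBody tl <;>
    cases hc : PySem.Str.isIn ":" line <;>
      simp_all [altStep, aHasBody, fixList]

-- ===== VERDICT (by name: the statement is the Claim_ definition above) =====
theorem fix_incomplete_lean_code_spec : Claim_equal_fix_incomplete_lean_code := by
  intro code _
  unfold Spec_fix_incomplete_lean_code fix_incomplete_lean_code fix_incomplete_lean_code_alt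
  simp only []
  rw [List.foldl_reverse, fold_eq_fixList, aLoop_eq_fixList]
  simp
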